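-- pv_equiv track=rewrite | github.com/realray808/hw8 | Movie_recommend.py | nearest_user
-- ===== SOURCE A (Python) =====
-- Customers = {"Customer_3": [4, 3, 5, 2, 1],
--              "Customer_5": [1, 3, 4, 2, 5],
--              "Customer_1": [5, 4, 3, 2, 1],
--              "Customer_4": [4, 5, 2, 1, 3],
--              "Customer_2": [2, 3, 4, 1, 5],
--              "Customer_10": [3, 1, 2, 4, 5],
--              "Customer_11": [2, 5, 1, 4, 3],
--              "Customer_16": [1, 2, 4, 5, 3],
--              "Customer_22": [5, 1, 3, 4, 2],
--              "Customer_100": [3, 2, 1, 4, 5]}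
--
-- def ranking_order(score, pos=4, value=0):
--     if pos < 1:
--         return value
--     else:
--         for i in score[:pos]:
--             if i <= score[pos]:
--                 value += 1
--     return ranking_order(score, pos-1, value)
--
-- def nearest_user(u1, customer):
--     u1_dismiss = ranking_order(Customers.get(u1))
--     diff = 100
--     match = {}
--     for i, j in customer.items():
--         if i != u1:
--             if abs(ranking_order(j) - u1_dismiss) < diff:
--                 match = {i}
--                 diff = abs(ranking_order(j) - u1_dismiss)
--             if abs(ranking_order(j) - u1_dismiss) == diff:
--                 match.add(i)
--     return match
-- ===== SOURCE B (Python) =====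
-- Customers = {"Customer_3": [4, 3, 5, 2, 1],
--              "Customer_5": [1, 3, 4, 2, 5],
--              "Customer_1": [5, 4, 3, 2, 1],
--              "Customer_4": [4, 5, 2, 1, 3],
--              "Customer_2": [2, 3, 4, 1, 5],
--              "Customer_10": [3, 1, 2, 4, 5],
--              "Customer_11": [2, 5, 1, 4, 3],
--              "Customer_16": [1, 2, 4, 5, 3],
--              "Customer_22": [5, 1, 3, 4, 2],
--              "Customer_100": [3, 2, 1, 4, 5]}
--
-- def _rank(score):
--     # pairwise count over the first five positions (closed form of the
--     # recursive ranking_order), computed once per customer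
--     return sum(1 for b in range(1, 5) for a in range(b) if score[a] <= score[b])
--
-- def nearest_user(u1, customer):
--     base = _rank(Customers[u1])
--     scores = {i: _rank(j) for i, j in customer.items() if i != u1}
--     if not scores:
--         return {}
--     best = min(abs(s - base) for s in scores.values())
--     return {i for i, s in scores.items() if abs(s - base) == best}
-- ===== Notes on version B (the rewrite author's own statement) =====
-- stated objective: simpler
-- what changed: A's single-pass running-min loop with an inline set rebuild (and three recursive ranking_order calls per entry) is replaced by a build-score-table / take-min / filter decomposition, with the recursive slice-based ranking replaced by a closed-form pairwise comprehension computed once per entry.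
-- outside the precondition, e.g. on nearest_user('Customer_1', {}): A returns {}, B returns {}; on nearest_user('Customer_1', {'x': []}): A returns {'x'}, B raises IndexError
import Mathlib
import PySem

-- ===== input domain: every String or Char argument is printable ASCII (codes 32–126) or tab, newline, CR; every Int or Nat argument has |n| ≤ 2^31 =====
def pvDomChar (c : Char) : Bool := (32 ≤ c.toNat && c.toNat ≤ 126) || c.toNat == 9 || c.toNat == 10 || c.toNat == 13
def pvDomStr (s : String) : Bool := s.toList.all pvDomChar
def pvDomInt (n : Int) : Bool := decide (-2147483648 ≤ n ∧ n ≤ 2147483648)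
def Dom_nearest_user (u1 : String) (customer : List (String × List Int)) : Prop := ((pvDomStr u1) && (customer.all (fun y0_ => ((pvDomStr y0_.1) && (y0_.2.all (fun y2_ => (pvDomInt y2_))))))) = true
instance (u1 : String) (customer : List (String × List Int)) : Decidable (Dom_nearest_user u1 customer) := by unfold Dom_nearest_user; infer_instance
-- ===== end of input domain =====

-- B replaces A's running-min loop (which recomputes the recursive ranking three times per entry)
-- by a build-score-table / take-min / filter decomposition with a closed-form pairwise ranking count.
-- The module-level Customers table, shared context of both programs.
def pvCustomers : List (String × List Int) :=
  [("Customer_3", [4, 3, 5, 2, 1]),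
   ("Customer_5", [1, 3, 4, 2, 5]),
   ("Customer_1", [5, 4, 3, 2, 1]),
   ("Customer_4", [4, 5, 2, 1, 3]),
   ("Customer_2", [2, 3, 4, 1, 5]),
   ("Customer_10", [3, 1, 2, 4, 5]),
   ("Customer_11", [2, 5, 1, 4, 3]),
   ("Customer_16", [1, 2, 4, 5, 3]),
   ("Customer_22", [5, 1, 3, 4, 2]),
   ("Customer_100", [3, 2, 1, 4, 5])]

-- ===== PORT A =====
-- ranking_order(score, pos, value): recursion on pos, counting score[:pos] elements ≤ score[pos].
-- score[pos] is ported as pyGetD (exact under Pre_, which keeps the index in range; Python raises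
-- IndexError outside it and those inputs are excluded by Pre_).
def pvRankingOrder (score : List Int) (pos : Nat) (value : Int) : Int :=
  match pos with
  | 0 => value
  | p + 1 =>
      pvRankingOrder score p
        ((PySem.List.slice score none (some ((p : Int) + 1))).foldl
          (fun v i => if i ≤ PySem.List.pyGetD score ((p : Int) + 1) 0 then v + 1 else v)
          value)

def nearest_user (u1 : String) (customer : List (String × List Int)) : List String :=
  let u1_dismiss := pvRankingOrder (((PySem.Dict.mk pvCustomers).get? u1).getD []) 4 0
  (customer.foldl
    (fun (st : Int × List String) p =>
      if p.1 ≠ u1 then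
        let d1 := if |pvRankingOrder p.2 4 0 - u1_dismiss| < st.1 then |pvRankingOrder p.2 4 0 - u1_dismiss| else st.1
        let m1 := if |pvRankingOrder p.2 4 0 - u1_dismiss| < st.1 then PySem.Set.ofList [p.1] else st.2
        (d1, if |pvRankingOrder p.2 4 0 - u1_dismiss| = d1 then PySem.Set.add m1 p.1 else m1)
      else st)
    (100, (PySem.Set.empty : List String))).2

-- ===== PORT B =====
-- _rank(score): closed-form pairwise count over the first five positions (indices in range under Pre_).
def pvRank (score : List Int) : Int :=
  (PySem.List.pyRange 1 5 1).foldl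
    (fun acc b =>
      (PySem.List.pyRange 0 b 1).foldl
        (fun acc2 a =>
          if PySem.List.pyGetD score a 0 ≤ PySem.List.pyGetD score b 0 then acc2 + 1 else acc2)
        acc)
    0

def nearest_user_alt (u1 : String) (customer : List (String × List Int)) : List String :=
  let base := pvRank (((PySem.Dict.mk pvCustomers).get? u1).getD [])
  let scores := customer.foldl
    (fun (d : PySem.Dict String Int) p => if p.1 ≠ u1 then d.insert p.1 (pvRank p.2) else d)
    (PySem.Dict.mk [])
  if scores.items = [] then []
  else
    let best := (PySem.List.min? (scores.values.map (fun s => |s - base|)) (fun x => x)).getD 0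
    PySem.Set.ofList ((scores.items.filter (fun p => |p.2 - base| = best)).map Prod.fst)

-- ===== PRECONDITION & SPEC =====
-- Pre_ excludes: u1 not a key of Customers (A raises TypeError on ranking_order(None)); a non-u1
-- entry whose score list has fewer than 5 elements (A raises IndexError on score[4] for lengths
-- 1-4; for the empty list A happens to return rank 0 while B's pairwise count raises IndexError);
-- duplicate keys in customer, which cannot occur in the Python dict argument this list models;
-- and customers with no key other than u1, on which A returns the empty dict {} instead of a set.
def Pre_nearest_user (u1 : String) (customer : List (String × List Int)) : Prop :=
  u1 ∈ pvCustomers.map Prod.fst ∧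
  (∀ p ∈ customer, p.1 ≠ u1 → 5 ≤ p.2.length) ∧
  (customer.map Prod.fst).Nodup ∧
  (∃ p ∈ customer, p.1 ≠ u1)
instance (u1 : String) (customer : List (String × List Int)) : Decidable (Pre_nearest_user u1 customer) := by unfold Pre_nearest_user; infer_instance

def pvWitness_nearest_user : String × (List (String × List Int)) :=
  ("Customer_1", [("x", [1, 2, 3, 4, 5]), ("y", [5, 4, 3, 2, 1])])

def Spec_nearest_user (u1 : String) (customer : List (String × List Int)) (out : List String) : Prop := out = nearest_user_alt u1 customer
instance (u1 : String) (customer : List (String × List Int)) (out : List String) : Decidable (Spec_nearest_user u1 customer out) := by unfold Spec_nearest_user; infer_instance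

-- ===== CLAIM (what is proved, stated in full; the proofs are below) =====
def Claim_equal_nearest_user : Prop := ∀ (u1 : String) (customer : List (String × List Int)), Dom_nearest_user u1 customer → Pre_nearest_user u1 customer → Spec_nearest_user u1 customer (nearest_user u1 customer)

-- ===== LEMMAS AND PROOFS =====

-- the two ranking computations agree on score lists of length ≥ 5
set_option maxHeartbeats 1000000 in
theorem pv_rank_eq (s : List Int) (h : 5 ≤ s.length) : pvRankingOrder s 4 0 = pvRank s := by
  obtain ⟨a, b, c, d, e, rest, rfl⟩ :
      ∃ a b c d e rest, s = a :: b :: c :: d :: e :: rest := by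
    match s, h with
    | a :: b :: c :: d :: e :: rest, _ => exact ⟨a, b, c, d, e, rest, rfl⟩
  have h05 : PySem.List.pyRange 1 5 1 = [((1:Nat):Int),((2:Nat):Int),((3:Nat):Int),((4:Nat):Int)] := by decide
  have h1 : PySem.List.pyRange 0 ((1:Nat):Int) 1 = [((0:Nat):Int)] := by decide
  have h2 : PySem.List.pyRange 0 ((2:Nat):Int) 1 = [((0:Nat):Int),((1:Nat):Int)] := by decide
  have h3 : PySem.List.pyRange 0 ((3:Nat):Int) 1 = [((0:Nat):Int),((1:Nat):Int),((2:Nat):Int)] := by decide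
  have h4 : PySem.List.pyRange 0 ((4:Nat):Int) 1 = [((0:Nat):Int),((1:Nat):Int),((2:Nat):Int),((3:Nat):Int)] := by decide
  rw [pvRank, h05]
  simp only [List.foldl_cons, List.foldl_nil]
  simp only [h1, h2, h3, h4]
  simp only [PySem.List.foldl_ite_add_one]
  simp only [pvRankingOrder]
  rw [show ((3:Nat):Int) + 1 = ((4:Nat):Int) by norm_num, show ((2:Nat):Int) + 1 = ((3:Nat):Int) by norm_num,
      show ((1:Nat):Int) + 1 = ((2:Nat):Int) by norm_num, show ((0:Nat):Int) + 1 = ((1:Nat):Int) by norm_num]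
  simp only [PySem.List.slice_to_natCast, PySem.List.foldl_ite_add_one, PySem.List.pyGetD_natCast]
  simp only [List.take_succ_cons, List.take_zero, List.countP_cons, List.countP_nil,
    List.getD_cons_succ, List.getD_cons_zero, decide_eq_true_eq]
  push_cast
  have g0 : PySem.List.pyGetD (a::b::c::d::e::rest) 0 0 = a := by
    rw [show (0:Int) = ((0:Nat):Int) from rfl, PySem.List.pyGetD_natCast]; rfl
  have g1 : PySem.List.pyGetD (a::b::c::d::e::rest) 1 0 = b := by
    rw [show (1:Int) = ((1:Nat):Int) from rfl, PySem.List.pyGetD_natCast]; rfl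
  have g2 : PySem.List.pyGetD (a::b::c::d::e::rest) 2 0 = c := by
    rw [show (2:Int) = ((2:Nat):Int) from rfl, PySem.List.pyGetD_natCast]; rfl
  have g3 : PySem.List.pyGetD (a::b::c::d::e::rest) 3 0 = d := by
    rw [show (3:Int) = ((3:Nat):Int) from rfl, PySem.List.pyGetD_natCast]; rfl
  simp only [g0, g1, g2, g3]
  ring

-- pvRank always lies between 0 and 10 (at most one count per compared pair)
theorem pv_rank_bounds (s : List Int) : 0 ≤ pvRank s ∧ pvRank s ≤ 10 := by
  have h05 : PySem.List.pyRange 1 5 1 = [((1:Nat):Int),((2:Nat):Int),((3:Nat):Int),((4:Nat):Int)] := by decide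
  have h1 : PySem.List.pyRange 0 ((1:Nat):Int) 1 = [((0:Nat):Int)] := by decide
  have h2 : PySem.List.pyRange 0 ((2:Nat):Int) 1 = [((0:Nat):Int),((1:Nat):Int)] := by decide
  have h3 : PySem.List.pyRange 0 ((3:Nat):Int) 1 = [((0:Nat):Int),((1:Nat):Int),((2:Nat):Int)] := by decide
  have h4 : PySem.List.pyRange 0 ((4:Nat):Int) 1 = [((0:Nat):Int),((1:Nat):Int),((2:Nat):Int),((3:Nat):Int)] := by decide
  rw [pvRank, h05]
  simp only [List.foldl_cons, List.foldl_nil]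
  simp only [h1, h2, h3, h4]
  simp only [PySem.List.foldl_ite_add_one]
  constructor <;>
  · have k1 := List.countP_le_length (p := fun x => decide (PySem.List.pyGetD s x 0 ≤ PySem.List.pyGetD s ((1:Nat):Int) 0)) (l := [((0:Nat):Int)])
    have k2 := List.countP_le_length (p := fun x => decide (PySem.List.pyGetD s x 0 ≤ PySem.List.pyGetD s ((2:Nat):Int) 0)) (l := [((0:Nat):Int),((1:Nat):Int)])
    have k3 := List.countP_le_length (p := fun x => decide (PySem.List.pyGetD s x 0 ≤ PySem.List.pyGetD s ((3:Nat):Int) 0)) (l := [((0:Nat):Int),((1:Nat):Int),((2:Nat):Int)])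
    have k4 := List.countP_le_length (p := fun x => decide (PySem.List.pyGetD s x 0 ≤ PySem.List.pyGetD s ((4:Nat):Int) 0)) (l := [((0:Nat):Int),((1:Nat):Int),((2:Nat):Int),((3:Nat):Int)])
    simp only [List.length_cons, List.length_nil] at k1 k2 k3 k4
    omega

-- facts about the looked-up base ranking for a key of Customers
theorem pv_base_facts (u1 : String) (h : u1 ∈ pvCustomers.map Prod.fst) :
    pvRankingOrder (((PySem.Dict.mk pvCustomers).get? u1).getD []) 4 0
      = pvRank (((PySem.Dict.mk pvCustomers).get? u1).getD []) ∧
    0 ≤ pvRank (((PySem.Dict.mk pvCustomers).get? u1).getD []) ∧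
    pvRank (((PySem.Dict.mk pvCustomers).get? u1).getD []) ≤ 10 := by
  have hlen : 5 ≤ (((PySem.Dict.mk pvCustomers).get? u1).getD []).length := by
    simp only [pvCustomers, List.map_cons, List.map_nil, List.mem_cons, List.not_mem_nil, or_false] at h
    rcases h with rfl|rfl|rfl|rfl|rfl|rfl|rfl|rfl|rfl|rfl <;> decide
  exact ⟨pv_rank_eq _ hlen, (pv_rank_bounds _).1, (pv_rank_bounds _).2⟩

-- the invariant of A's running-min loop, over the already-filtered entry list
theorem pv_loop_spec (f : String × List Int → ℤ) (s : List (String × List Int)) :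
    ∀ (diff : Int) (m : List String),
      (s.map Prod.fst).Nodup → (∀ p ∈ s, p.1 ∉ m) →
      s.foldl
        (fun (st : Int × List String) p =>
          (if f p < st.1 then f p else st.1,
           if f p = (if f p < st.1 then f p else st.1) then
             PySem.Set.add (if f p < st.1 then PySem.Set.ofList [p.1] else st.2) p.1
           else (if f p < st.1 then PySem.Set.ofList [p.1] else st.2))) (diff, m)
      = ((s.map f).foldl min diff,
         (if (s.map f).foldl min diff < diff then [] else m)
           ++ (s.filter (fun p => f p = (s.map f).foldl min diff)).map Prod.fst) := by
  induction s with
  | nil => intro diff m _ _; simp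
  | cons p t ih =>
    intro diff m hnd hdisj
    have hpt : p.1 ∉ t.map Prod.fst := by
      simp only [List.map_cons, List.nodup_cons] at hnd; exact hnd.1
    have hnd' : (t.map Prod.fst).Nodup := by
      simp only [List.map_cons, List.nodup_cons] at hnd; exact hnd.2
    have hpm : p.1 ∉ m := hdisj p (by simp)
    simp only [List.foldl_cons, List.map_cons, List.filter_cons]
    by_cases hlt : f p < diff
    · -- strict improvement: state becomes (f p, [p.1])
      simp only [if_pos hlt]
      rw [PySem.Set.ofList_eq_self_of_nodup [p.1] (by simp)]
      rw [PySem.Set.add_of_mem (by simp : p.1 ∈ ([p.1] : List String)), ite_self]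
      rw [ih (f p) [p.1] hnd'
        (by intro q hq hmem; simp only [List.mem_singleton] at hmem
            exact hpt (hmem ▸ List.mem_map_of_mem hq))]
      simp only [min_eq_right hlt.le]
      have hble := (PySem.List.foldl_min_le (t.map f) (f p)).1
      have hb100 : (t.map f).foldl min (f p) < diff := lt_of_le_of_lt hble hlt
      rw [if_pos hb100]
      by_cases hbe : (t.map f).foldl min (f p) < f p
      · rw [if_pos hbe, if_neg (by simp only [decide_eq_true_eq]; omega)]
      · have hfb : (t.map f).foldl min (f p) = f p := le_antisymm hble (not_lt.mp hbe)
        rw [if_neg (by omega), if_pos (by simp only [decide_eq_true_eq]; omega)]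
        simp
    · by_cases heq : f p = diff
      · -- equal to the running minimum: p.1 appended to m
        simp only [if_neg hlt, if_pos heq]
        rw [PySem.Set.add_of_not_mem hpm]
        rw [ih diff (m ++ [p.1]) hnd' ?hdis]
        case hdis =>
          intro q hq
          simp only [List.mem_append, List.mem_singleton]
          rintro (hq1 | hq1)
          · exact hdisj q (List.mem_cons_of_mem _ hq) hq1
          · exact hpt (hq1 ▸ List.mem_map_of_mem hq)
        simp only [min_eq_left (show diff ≤ f p by omega)]
        have hble := (PySem.List.foldl_min_le (t.map f) diff).1
        by_cases hb : (t.map f).foldl min diff < diff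
        · rw [if_pos hb, if_pos hb, if_neg (by simp only [decide_eq_true_eq]; omega)]
        · have hbd : (t.map f).foldl min diff = diff := le_antisymm hble (not_lt.mp hb)
          rw [if_neg hb, if_neg hb, if_pos (by simp only [decide_eq_true_eq]; omega)]
          simp
      · -- strictly worse: state unchanged
        simp only [if_neg hlt, if_neg heq]
        rw [ih diff m hnd' (fun q hq => hdisj q (List.mem_cons_of_mem _ hq))]
        simp only [min_eq_left (show diff ≤ f p by omega)]
        have hble := (PySem.List.foldl_min_le (t.map f) diff).1
        have hcond : decide (f p = (t.map f).foldl min diff) = false := by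
          simp only [decide_eq_false_iff_not]; omega
        simp only [hcond, Bool.false_eq_true, if_false]

-- ===== VERDICT (by name: the statement is the Claim_ definition above) =====
theorem nearest_user_spec : Claim_equal_nearest_user := by
  intro u1 customer _hdom hpre
  obtain ⟨hu, hlen, hnd, _hne⟩ := hpre
  show nearest_user u1 customer = nearest_user_alt u1 customer
  have hbase := pv_base_facts u1 hu
  simp only [nearest_user, nearest_user_alt]
  rw [hbase.1]
  set base := pvRank (((PySem.Dict.mk pvCustomers).get? u1).getD []) with hbasedef
  -- A's loop: replace the recursive ranking by pvRank entrywise, then pull out the u1 guard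
  rw [PySem.List.foldl_congr_mem' customer _
      (fun (st : Int × List String) p =>
        if p.1 ≠ u1 then
          (if |pvRank p.2 - base| < st.1 then |pvRank p.2 - base| else st.1,
           if |pvRank p.2 - base| = (if |pvRank p.2 - base| < st.1 then |pvRank p.2 - base| else st.1) then
             PySem.Set.add (if |pvRank p.2 - base| < st.1 then PySem.Set.ofList [p.1] else st.2) p.1
           else (if |pvRank p.2 - base| < st.1 then PySem.Set.ofList [p.1] else st.2))
        else st)
      (100, (PySem.Set.empty : List String))
      (by
        intro p hp acc
        by_cases hne : p.1 ≠ u1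
        · simp only [if_pos hne, pv_rank_eq p.2 (hlen p hp hne)]
        · simp only [if_neg hne])]
  rw [PySem.List.foldl_ite_eq_foldl_filter (fun p => p.1 ≠ u1)
      (fun (st : Int × List String) p =>
        (if |pvRank p.2 - base| < st.1 then |pvRank p.2 - base| else st.1,
         if |pvRank p.2 - base| = (if |pvRank p.2 - base| < st.1 then |pvRank p.2 - base| else st.1) then
           PySem.Set.add (if |pvRank p.2 - base| < st.1 then PySem.Set.ofList [p.1] else st.2) p.1
         else (if |pvRank p.2 - base| < st.1 then PySem.Set.ofList [p.1] else st.2)))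
      customer (100, (PySem.Set.empty : List String))]
  rw [PySem.List.foldl_ite_eq_foldl_filter (fun p => p.1 ≠ u1)
      (fun (d : PySem.Dict String Int) p => d.insert p.1 (pvRank p.2)) customer (PySem.Dict.mk [])]
  set s := customer.filter (fun p => decide (p.1 ≠ u1)) with hsdef
  have hsub : s.Sublist customer := List.filter_sublist
  have hsnd : (s.map Prod.fst).Nodup := (hsub.map Prod.fst).nodup hnd
  -- B's dict of scores is the mapped filtered list
  have hitems : ((s.foldl (fun (d : PySem.Dict String Int) p => d.insert p.1 (pvRank p.2)) (PySem.Dict.mk [])).items)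
      = s.map (fun p => (p.1, pvRank p.2)) := by
    rw [PySem.Dict.items_foldl_insert_fresh s Prod.fst (fun p => pvRank p.2) (PySem.Dict.mk [])
        (fun a _ => rfl) hsnd]
    rfl
  -- A's loop by its invariant
  rw [pv_loop_spec (fun p => |pvRank p.2 - base|) s 100 PySem.Set.empty hsnd (by intro p _ h; simp [PySem.Set.empty] at h)]
  simp only [PySem.Set.empty, ite_self, List.nil_append, PySem.Dict.values]
  simp only [hitems]
  cases hs : s with
  | nil => simp
  | cons x t =>
    have hsnd' : ((x :: t).map Prod.fst).Nodup := hs ▸ hsnd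
    rw [if_neg (by simp)]
    -- the minimum B computes is the minimum A's loop reaches
    have hfx : |pvRank x.2 - base| ≤ 100 := by
      have h1 := pv_rank_bounds x.2
      have h2 := hbase.2.1
      have h3 := hbase.2.2
      rw [abs_le]; omega
    rw [List.map_cons, List.foldl_cons, min_eq_right hfx]
    simp only [List.map_cons, List.map_map, Function.comp_def]
    rw [PySem.List.min?_id_cons, Option.getD_some]
    -- B's filter over the mapped list is A's filter, mapped
    rw [← List.map_cons (f := fun p : String × List Int => (p.1, pvRank p.2)) (a := x) (l := t), List.filter_map]
    simp only [List.map_map, Function.comp_def]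
    rw [PySem.Set.ofList_eq_self_of_nodup _
        (by simpa using (List.Sublist.map Prod.fst (List.filter_sublist)).nodup hsnd')]
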